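-- pv_equiv track=rewrite | github.com/josefrank/PythonWorkout | exercise7.py | ubbi_dubbi
-- ===== SOURCE A (Python) =====
-- def ubbi_dubbi(word):
--     output = []
--     for letter in word:
--         if letter in "aeiou":
--             output.append("ub" + letter)
--         else:
--             output.append(letter)
--     result = ''.join(output)
--     return result
-- ===== SOURCE B (Python) =====
-- import re
--
-- def ubbi_dubbi(word):
--     return re.sub(r'([aeiou])', r'ub\1', word)
-- ===== Notes on version B (the rewrite author's own statement) =====
-- stated objective: idiomatic
-- what changed: Replaced the per-character loop with list accumulation and join by a single regex substitution re.sub(r'([aeiou])', r'ub\1', word).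
import Mathlib
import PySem

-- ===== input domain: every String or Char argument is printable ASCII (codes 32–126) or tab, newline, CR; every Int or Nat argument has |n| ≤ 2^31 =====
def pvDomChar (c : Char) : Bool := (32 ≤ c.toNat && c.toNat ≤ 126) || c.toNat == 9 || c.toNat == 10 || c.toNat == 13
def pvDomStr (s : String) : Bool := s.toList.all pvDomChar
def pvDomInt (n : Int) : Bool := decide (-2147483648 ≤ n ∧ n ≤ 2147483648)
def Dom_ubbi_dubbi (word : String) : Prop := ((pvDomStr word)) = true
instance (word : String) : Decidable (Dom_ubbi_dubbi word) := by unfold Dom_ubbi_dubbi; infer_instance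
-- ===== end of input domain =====

-- B replaces A's explicit loop/append/join with a single regex substitution (idiomatic; same cost).

-- ===== PORT A =====
-- loop appending "ub"+letter or letter into output, then ''.join(output)
def ubbi_dubbi (word : String) : String :=
  let output : List String :=
    word.toList.foldl
      (fun acc letter =>
        if letter ∈ "aeiou".toList then acc ++ ["ub".push letter]
        else acc ++ [String.singleton letter]) []
  String.join output

-- ===== PORT B =====
-- re.sub(r'([aeiou])', r'ub\1', word): each vowel match is replaced by 'ub'+vowel,
-- everything else is copied; ported as the corresponding per-match expansion of the string.
def ubbi_dubbi_alt (word : String) : String :=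
  String.ofList (word.toList.flatMap
    (fun c => if c ∈ ['a','e','i','o','u'] then ['u','b',c] else [c]))

-- ===== PRECONDITION & SPEC =====
def Spec_ubbi_dubbi (word : String) (out : String) : Prop := out = ubbi_dubbi_alt word
instance (word : String) (out : String) : Decidable (Spec_ubbi_dubbi word out) := by unfold Spec_ubbi_dubbi; infer_instance

-- ===== CLAIM (what is proved, stated in full; the proofs are below) =====
def Claim_equal_ubbi_dubbi : Prop := ∀ (word : String), Dom_ubbi_dubbi word → Spec_ubbi_dubbi word (ubbi_dubbi word)

-- ===== LEMMAS AND PROOFS =====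
theorem ubbi_join_snoc (acc : List String) (x : String) :
    (String.join (acc ++ [x])).toList = (String.join acc).toList ++ x.toList := by
  simp [String.join]

theorem ubbi_join_foldl (l : List Char) (acc : List String) :
    (String.join (l.foldl
      (fun acc letter =>
        if letter ∈ "aeiou".toList then acc ++ ["ub".push letter]
        else acc ++ [String.singleton letter]) acc)).toList =
    (String.join acc).toList ++ l.flatMap
      (fun c => if c ∈ ['a','e','i','o','u'] then ['u','b',c] else [c]) := by
  induction l generalizing acc with
  | nil => simp
  | cons c l ih =>
    rw [List.foldl_cons, List.flatMap_cons]
    by_cases h : c ∈ "aeiou".toList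
    · rw [if_pos h, ih, ubbi_join_snoc]
      have h' : c ∈ ['a','e','i','o','u'] := h
      simp [h', List.append_assoc]
    · rw [if_neg h, ih, ubbi_join_snoc]
      have h' : c ∉ ['a','e','i','o','u'] := h
      simp [h', String.singleton, List.append_assoc]

-- ===== VERDICT (by name: the statement is the Claim_ definition above) =====
theorem ubbi_dubbi_spec : Claim_equal_ubbi_dubbi := by
  intro word _
  show _ = _
  apply String.toList_inj.mp
  simpa [ubbi_dubbi, ubbi_dubbi_alt] using ubbi_join_foldl word.toList []
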